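-- pv_equiv track=rewrite | github.com/bveber/adoc-2022 | day-16/day-16.py | calculate_remaining_score
-- ===== SOURCE A (Python) =====
-- def calculate_remaining_score(valves, unopened, time_remaining):
--     sorted_unopened_rates = sorted(
--         valve["rate"] for name, valve in valves.items() if name in unopened
--     )[::-1]
--     remaining_score = 0
--     for i, time_multiplier in enumerate(range(time_remaining - 2, 0, -2)):
--         if i == len(sorted_unopened_rates):
--             break
--         remaining_score += sorted_unopened_rates[i] * time_multiplier
--     return remaining_score
-- ===== SOURCE B (Python) =====
-- def calculate_remaining_score(valves, unopened, time_remaining):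
--     # Greedy recursion: open the best remaining valve, recurse with 2 fewer minutes.
--     def go(pool, t):
--         if t - 2 <= 0 or not pool:
--             return 0
--         best = max(pool)
--         rest = list(pool)
--         rest.remove(best)
--         return best * (t - 2) + go(rest, t - 2)
--     return go([valve["rate"] for name, valve in valves.items() if name in unopened],
--               time_remaining)
-- ===== Notes on version B (the rewrite author's own statement) =====
-- stated objective: alternative
-- what changed: B never sorts and has no multiplier loop: a greedy recursion extracts the current maximum rate from the pool and recurses with time_remaining-2, adding best*(time_remaining-2) at each step, instead of A's full sort + reversed list indexed by an enumerate/break loop over range(time_remaining-2,0,-2).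
import Mathlib
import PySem

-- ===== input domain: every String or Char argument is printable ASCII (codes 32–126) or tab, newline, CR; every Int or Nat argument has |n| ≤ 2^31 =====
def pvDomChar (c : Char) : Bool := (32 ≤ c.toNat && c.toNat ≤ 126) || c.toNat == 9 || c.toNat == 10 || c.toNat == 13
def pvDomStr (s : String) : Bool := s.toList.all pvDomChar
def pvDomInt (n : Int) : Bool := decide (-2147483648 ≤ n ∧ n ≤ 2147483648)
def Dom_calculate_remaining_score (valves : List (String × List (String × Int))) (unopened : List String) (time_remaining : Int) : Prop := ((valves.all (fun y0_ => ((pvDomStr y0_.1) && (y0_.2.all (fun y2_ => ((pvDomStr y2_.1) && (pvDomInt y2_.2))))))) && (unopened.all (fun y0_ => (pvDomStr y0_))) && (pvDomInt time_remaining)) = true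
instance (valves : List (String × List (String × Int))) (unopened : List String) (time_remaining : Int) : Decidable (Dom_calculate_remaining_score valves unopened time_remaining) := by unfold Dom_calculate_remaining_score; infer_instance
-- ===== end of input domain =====

-- B replaces A's full sort + reversed-list indexing loop by a greedy recursion that
-- extracts the maximum rate and recurses on time_remaining - 2; equivalence of the
-- RETURN values is proved (B mutates only its own local list).

-- ===== PORT A =====
-- the 'for i, time_multiplier in enumerate(range(...)):' loop with its break and
-- 'remaining_score += sorted_unopened_rates[i] * time_multiplier'.
-- The pyGetD default 0 is never used: the loop breaks before i reaches the length.
def pvLoopA (rates : List Int) (acc : Int) : List (Int × Int) → Int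
  | [] => acc
  | (i, m) :: rest =>
      if i = (rates.length : Int) then acc
      else pvLoopA rates (acc + PySem.List.pyGetD rates i 0 * m) rest

def calculate_remaining_score (valves : List (String × List (String × Int))) (unopened : List String) (time_remaining : Int) : Int :=
  -- sorted(... generator ...)[::-1]; valve["rate"] raises KeyError when absent — excluded by Pre_, so getD's default is never used
  let sorted_unopened_rates :=
    (PySem.List.sorted ((valves.filter (fun p => unopened.contains p.1)).map
        (fun p => PySem.Dict.getD (PySem.Dict.mk p.2) "rate" 0)) (fun x => x) false).reverse
  pvLoopA sorted_unopened_rates 0 (PySem.List.enumerate (PySem.List.pyRange (time_remaining - 2) 0 (-2)) 0)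

-- ===== PORT B =====
-- termination helper for pvGo: removing max(pool) shortens a nonempty pool
theorem pvRest_length_lt (pool : List Int) (h : pool ≠ []) :
    ((PySem.List.remove? pool ((PySem.List.max? pool (fun x => x)).getD 0)).getD []).length < pool.length := by
  obtain ⟨b, hb⟩ : ∃ b, PySem.List.max? pool (fun x => x) = some b := by
    cases hmx : PySem.List.max? pool (fun x => x) with
    | none => exact absurd ((PySem.List.max?_eq_none_iff _ _).1 hmx) h
    | some b => exact ⟨b, rfl⟩
  have hmem : b ∈ pool := PySem.List.max?_mem hb
  rw [hb, Option.getD_some, PySem.List.remove?_eq_some_erase pool b hmem, Option.getD_some]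
  rw [List.length_erase_of_mem hmem]
  exact Nat.pred_lt (by simpa [List.length_eq_zero_iff] using (List.length_pos_of_ne_nil h).ne')

-- 'def go(pool, t): if t-2 <= 0 or not pool: return 0; best = max(pool);
--  rest = list(pool); rest.remove(best); return best*(t-2) + go(rest, t-2)'
-- max/remove cannot fail under the emptiness guard, so the getD defaults are never used.
def pvGo (pool : List Int) (t : Int) : Int :=
  if h : t - 2 ≤ 0 ∨ pool = [] then 0
  else
    let best := (PySem.List.max? pool (fun x => x)).getD 0
    let rest := (PySem.List.remove? pool best).getD []
    best * (t - 2) + pvGo rest (t - 2)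
termination_by pool.length
decreasing_by
  exact pvRest_length_lt pool (fun hnil => h (Or.inr hnil))

def calculate_remaining_score_alt (valves : List (String × List (String × Int))) (unopened : List String) (time_remaining : Int) : Int :=
  -- the comprehension '[valve["rate"] for name, valve in valves.items() if name in unopened]' as a foldr
  pvGo (valves.foldr
          (fun p acc => if unopened.contains p.1 then PySem.Dict.getD (PySem.Dict.mk p.2) "rate" 0 :: acc else acc) [])
       time_remaining

-- ===== PRECONDITION & SPEC =====
-- Pre_ excludes exactly the inputs on which Python A (and B) raises KeyError:
-- some valve whose name is in 'unopened' has no "rate" key.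
def Pre_calculate_remaining_score (valves : List (String × List (String × Int))) (unopened : List String) (time_remaining : Int) : Prop :=
  (valves.all (fun p => !unopened.contains p.1 || (PySem.Dict.get? (PySem.Dict.mk p.2) "rate").isSome)) = true
instance (valves : List (String × List (String × Int))) (unopened : List String) (time_remaining : Int) : Decidable (Pre_calculate_remaining_score valves unopened time_remaining) := by unfold Pre_calculate_remaining_score; infer_instance

def pvWitness_calculate_remaining_score : (List (String × List (String × Int))) × List String × Int :=
  ([("AA", [("rate", 3)]), ("BB", [("rate", 7)])], ["AA", "BB"], 6)

def Spec_calculate_remaining_score (valves : List (String × List (String × Int))) (unopened : List String) (time_remaining : Int) (out : Int) : Prop := out = calculate_remaining_score_alt valves unopened time_remaining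
instance (valves : List (String × List (String × Int))) (unopened : List String) (time_remaining : Int) (out : Int) : Decidable (Spec_calculate_remaining_score valves unopened time_remaining out) := by unfold Spec_calculate_remaining_score; infer_instance

-- ===== CLAIM (what is proved, stated in full; the proofs are below) =====
def Claim_equal_calculate_remaining_score : Prop := ∀ (valves : List (String × List (String × Int))) (unopened : List String) (time_remaining : Int), Dom_calculate_remaining_score valves unopened time_remaining → Pre_calculate_remaining_score valves unopened time_remaining → Spec_calculate_remaining_score valves unopened time_remaining (calculate_remaining_score valves unopened time_remaining)

-- ===== LEMMAS AND PROOFS =====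

-- the descending-sorted view of a list of rates
def pvSortDesc (l : List Int) : List Int := (PySem.List.sorted l (fun x => x) false).reverse

-- Σ rate·mult over zipped pairs
def pvWSum (xs ms : List Int) : Int := ((xs.zip ms).map (fun p => p.1 * p.2)).sum

-- extracting the maximum is taking the head of the descending sort
theorem pvSortDesc_cons_max (l : List Int) (b : Int)
    (hb : PySem.List.max? l (fun x => x) = some b) :
    pvSortDesc l = b :: pvSortDesc (l.erase b) := by
  have hmem : b ∈ l := PySem.List.max?_mem hb
  have hmax : ∀ y ∈ l, y ≤ b := by
    intro y hy; exact PySem.List.max?_isMax hb y hy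
  have key : PySem.List.sorted l (fun x => x) false
      = PySem.List.sorted (l.erase b) (fun x => x) false ++ [b] := by
    apply PySem.List.sorted_id_eq_of_perm_of_pairwise
    · have h1 : (PySem.List.sorted (l.erase b) (fun x => x) false ++ [b]).Perm
          ((l.erase b) ++ [b]) := (PySem.List.sorted_perm _ _ _).append_right _
      have h2 : ((l.erase b) ++ [b]).Perm l :=
        ((l.erase b).perm_append_singleton b).trans ((l.perm_cons_erase hmem).symm)
      exact h1.trans h2
    · rw [List.pairwise_append]
      refine ⟨?_, by simp, ?_⟩
      · simpa using PySem.List.sorted_pairwise (l.erase b) (fun x => x)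
      · intro x hx y hy
        have hx' : x ∈ l.erase b := (PySem.List.mem_sorted _ _ _ _).1 hx
        rw [List.mem_singleton] at hy
        rw [hy]
        exact hmax x (List.mem_of_mem_erase hx')
  simp [pvSortDesc, key]

-- characterisation of A's loop: it adds the weighted sum of the suffix from index s
theorem pvLoopA_char (mults : List Int) : ∀ (rl : List Int) (s : Nat) (acc : Int),
    s ≤ rl.length →
    pvLoopA rl acc (PySem.List.enumerate mults (s : Int)) = acc + pvWSum (rl.drop s) mults := by
  induction mults with
  | nil => intro rl s acc _; simp [PySem.List.enumerate, pvLoopA, pvWSum]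
  | cons m ms ih =>
    intro rl s acc hs
    rw [PySem.List.enumerate_cons]
    by_cases h : s = rl.length
    · subst h
      simp [pvLoopA, pvWSum]
    · have hlt : s < rl.length := lt_of_le_of_ne hs h
      have hne : (s : Int) ≠ (rl.length : Int) := by exact_mod_cast h
      have hget : PySem.List.pyGetD rl (s : Int) 0 = rl[s] := by
        rw [PySem.List.pyGetD_natCast]; exact List.getD_eq_getElem rl 0 hlt
      have hcast : ((s : Int) + 1) = ((s + 1 : Nat) : Int) := by push_cast; ring
      have hdrop : List.drop s rl = rl[s] :: List.drop (s + 1) rl := by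
        rw [List.drop_eq_getElem_cons hlt]
      simp only [pvLoopA, if_neg hne]
      rw [hcast, ih rl (s + 1) _ hlt, hdrop]
      simp only [pvWSum, hget, List.zip_cons_cons, List.map_cons, List.sum_cons]
      ring

-- range(a, 0, -2) for a ≤ 0 is empty
theorem pvRange_neg_two_nil (a : Int) (h : a ≤ 0) :
    PySem.List.pyRange a 0 (-2) = [] := by
  simp only [PySem.List.pyRange]
  norm_num
  intro hlt
  omega

-- range(a, 0, -2) for 0 < a starts with a and continues as range(a-2, 0, -2)
theorem pvRange_neg_two_cons (a : Int) (h : 0 < a) :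
    PySem.List.pyRange a 0 (-2) = a :: PySem.List.pyRange (a - 2) 0 (-2) := by
  simp only [PySem.List.pyRange]
  norm_num
  rw [if_pos h]
  by_cases h2 : 2 < a
  · rw [if_pos h2]
    have hn : ((a + 2 - 1) / 2).toNat = ((a - 1) / 2).toNat + 1 := by omega
    rw [hn, List.range_succ_eq_map]
    simp only [List.map_cons, List.map_map, Nat.cast_zero]
    refine List.cons_eq_cons.mpr ⟨by norm_num, ?_⟩
    apply List.map_congr_left
    intro k _
    simp only [Function.comp_apply]
    push_cast
    ring
  · rw [if_neg h2]
    have hn : ((a + 2 - 1) / 2).toNat = 1 := by omega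
    rw [hn]
    simp [List.range_one]

-- characterisation of B's recursion via the descending sort and the multiplier range
theorem pvGo_char : ∀ (n : Nat) (pool : List Int) (t : Int), pool.length = n →
    pvGo pool t = pvWSum (pvSortDesc pool) (PySem.List.pyRange (t - 2) 0 (-2)) := by
  intro n
  induction n using Nat.strong_induction_on with
  | _ n ih =>
    intro pool t hlen
    by_cases hstop : t - 2 ≤ 0 ∨ pool = []
    · rw [pvGo, dif_pos hstop]
      rcases hstop with ht | hp
      · rw [pvRange_neg_two_nil _ ht]; simp [pvWSum]
      · subst hp; simp [pvSortDesc, PySem.List.sorted, pvWSum]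
    · push_neg at hstop
      obtain ⟨ht, hp⟩ := hstop
      obtain ⟨b, hb⟩ : ∃ b, PySem.List.max? pool (fun x => x) = some b := by
        cases hmx : PySem.List.max? pool (fun x => x) with
        | none => exact absurd ((PySem.List.max?_eq_none_iff _ _).1 hmx) hp
        | some b => exact ⟨b, rfl⟩
      have hmem : b ∈ pool := PySem.List.max?_mem hb
      have hrem : PySem.List.remove? pool b = some (pool.erase b) :=
        PySem.List.remove?_eq_some_erase pool b hmem
      rw [pvGo, dif_neg (by push_neg; exact ⟨ht, hp⟩)]
      simp only [hb, Option.getD_some, hrem]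
      have hlt : (pool.erase b).length < n := by
        rw [List.length_erase_of_mem hmem, hlen]
        exact Nat.pred_lt (by rw [← hlen]; simpa [List.length_eq_zero_iff] using (List.length_pos_of_ne_nil hp).ne')
      rw [ih _ hlt (pool.erase b) (t - 2) rfl]
      rw [pvSortDesc_cons_max pool b hb, pvRange_neg_two_cons (t - 2) (by omega)]
      simp only [pvWSum, List.zip_cons_cons, List.map_cons, List.sum_cons]

-- the comprehension foldr equals A's filter-then-map view of the rate pool
theorem pvFoldr_eq_filter_map (valves : List (String × List (String × Int))) (unopened : List String) :
    valves.foldr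
        (fun p acc => if unopened.contains p.1 then PySem.Dict.getD (PySem.Dict.mk p.2) "rate" 0 :: acc else acc) []
      = (valves.filter (fun p => unopened.contains p.1)).map
          (fun p => PySem.Dict.getD (PySem.Dict.mk p.2) "rate" 0) := by
  induction valves with
  | nil => rfl
  | cons p ps ih =>
    simp only [List.foldr_cons, List.filter_cons, ih]
    split_ifs <;> simp_all

-- ===== VERDICT (by name: the statement is the Claim_ definition above) =====
theorem calculate_remaining_score_spec : Claim_equal_calculate_remaining_score := by
  intro valves unopened time_remaining _ _
  unfold Spec_calculate_remaining_score calculate_remaining_score calculate_remaining_score_alt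
  rw [pvFoldr_eq_filter_map]
  set rates := (valves.filter (fun p => unopened.contains p.1)).map
      (fun p => PySem.Dict.getD (PySem.Dict.mk p.2) "rate" 0)
  have hA := pvLoopA_char (PySem.List.pyRange (time_remaining - 2) 0 (-2)) (pvSortDesc rates) 0 0 (Nat.zero_le _)
  simp only [Nat.cast_zero, List.drop_zero] at hA
  rw [pvGo_char rates.length rates time_remaining rfl]
  simpa [pvSortDesc] using hA
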